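-- pv_equiv track=rewrite | github.com/EugeneMMF/leetcode | cat-and-mouse-ii.py | canMouseWin
-- ===== SOURCE A (Python) =====
-- def canMouseWin(grid, catJump, mouseJump):
--     rows, cols = len(grid), len(grid[0])
--     for r in range(rows):
--         for c in range(cols):
--             if grid[r][c] == 'M':
--                 mouse_start = (r, c)
--             elif grid[r][c] == 'C':
--                 cat_start = (r, c)
--             elif grid[r][c] == 'F':
--                 food = (r, c)
--     max_turns = rows * cols * 2
--     dirs = [(1,0),(-1,0),(0,1),(0,-1)]
--     from functools import lru_cache
--     def moves(pos, jump):
--         r, c = pos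
--         res = [pos]
--         for dr, dc in dirs:
--             nr, nc = r, c
--             for _ in range(jump):
--                 nr += dr
--                 nc += dc
--                 if not (0 <= nr < rows and 0 <= nc < cols) or grid[nr][nc] == '#':
--                     break
--                 res.append((nr, nc))
--         return res
--     @lru_cache(None)
--     def dfs(mouse, cat, turn):
--         if turn >= max_turns:
--             return False
--         if mouse == cat:
--             return False
--         if mouse == food:
--             return True
--         if cat == food:
--             return False
--         player = turn % 2
--         if player == 0:
--             for nmouse in moves(mouse, mouseJump):
--                 if dfs(nmouse, cat, turn+1):
--                     return True
--             return False
--         else: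
--             for ncat in moves(cat, catJump):
--                 if not dfs(mouse, ncat, turn+1):
--                     return False
--             return True
--     return dfs(mouse_start, cat_start, 0)
-- ===== SOURCE B (Python) =====
-- def canMouseWin(grid, catJump, mouseJump):
--     h, w = len(grid), len(grid[0])
--     ncells = h * w
--     board = ''.join(row[:w] for row in grid)
--     mpos = cpos = fpos = -1
--     for i in range(ncells):
--         ch = board[i]
--         if ch == 'M':
--             mpos = i
--         elif ch == 'C':
--             cpos = i
--         elif ch == 'F':
--             fpos = i
--     if min(mpos, cpos, fpos) < 0:
--         raise ValueError('grid must contain M, C and F')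
--
--     def reach(i, jump):
--         out = [i]
--         for dy, dx in ((1, 0), (-1, 0), (0, 1), (0, -1)):
--             k = 1
--             while k <= jump:
--                 ny, nx = i // w + dy * k, i % w + dx * k
--                 if not (0 <= ny < h and 0 <= nx < w) or board[ny * w + nx] == '#':
--                     break
--                 out.append(ny * w + nx)
--                 k += 1
--         return out
--
--     mmoves = [reach(i, mouseJump) for i in range(ncells)]
--     cmoves = [reach(i, catJump) for i in range(ncells)]
--
--     def val(layer, turn, idx):
--         mse, cat = divmod(idx, ncells)
--         if mse == cat:
--             return False
--         if mse == fpos: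
--             return True
--         if cat == fpos:
--             return False
--         if turn % 2 == 0:
--             return any(layer[nm * ncells + cat] for nm in mmoves[mse])
--         return all(layer[mse * ncells + nx] for nx in cmoves[cat])
--
--     table = [False] * (ncells * ncells)
--     for turn in reversed(range(2 * ncells)):
--         table = [val(table, turn, idx) for idx in range(ncells * ncells)]
--     return table[mpos * ncells + cpos]
-- ===== Notes on version B (the rewrite author's own statement) =====
-- stated objective: alternative
-- what changed: Replaces A's top-down lru_cache DFS over ((mouse-cell, cat-cell) pairs, turn) with a bottom-up DP that flattens the board into one string, packs each (mouse, cat) state into a single integer index, precomputes per-cell move lists, and iterates plain boolean layer lists backwards from the turn horizon.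
import Mathlib
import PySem

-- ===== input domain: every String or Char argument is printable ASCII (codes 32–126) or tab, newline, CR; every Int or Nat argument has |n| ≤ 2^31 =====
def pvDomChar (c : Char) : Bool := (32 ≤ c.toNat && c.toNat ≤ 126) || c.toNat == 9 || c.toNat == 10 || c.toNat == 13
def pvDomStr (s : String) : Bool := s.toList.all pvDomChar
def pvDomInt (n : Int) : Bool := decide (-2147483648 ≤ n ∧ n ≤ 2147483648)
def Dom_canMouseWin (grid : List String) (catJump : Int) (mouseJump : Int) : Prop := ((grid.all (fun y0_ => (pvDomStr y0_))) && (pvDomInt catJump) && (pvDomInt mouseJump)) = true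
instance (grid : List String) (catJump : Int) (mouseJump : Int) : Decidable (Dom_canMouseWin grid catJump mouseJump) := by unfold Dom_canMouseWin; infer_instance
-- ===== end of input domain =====

-- B replaces A's memoized DFS over (mouse-pair, cat-pair, turn) by a bottom-up DP on a flat
-- board string with integer cell indices and plain Bool lists as turn layers
-- (objective: alternative decomposition, no speed claim).

-- ===== PORT A =====

-- grid cell access; exact for the in-range accesses the Python performs (all accesses under Pre_)
def pvCell (g : List (List Char)) (r c : Int) : Char := (g.getD r.toNat []).getD c.toNat ' '

def pvDirs : List (Int × Int) := [(1, 0), (-1, 0), (0, 1), (0, -1)]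

-- the elif chain of A's scanning loop
def pvSee (g : List (List Char)) (st : Option (Int × Int) × Option (Int × Int) × Option (Int × Int))
    (p : Int × Int) : Option (Int × Int) × Option (Int × Int) × Option (Int × Int) :=
  let ch := pvCell g p.1 p.2
  if ch = 'M' then (some p, st.2.1, st.2.2)
  else if ch = 'C' then (st.1, some p, st.2.2)
  else if ch = 'F' then (st.1, st.2.1, some p)
  else st

-- A's nested 'for r in range(rows): for c in range(cols)' scan
def pvScanA (g : List (List Char)) (rows cols : Nat) :
    Option (Int × Int) × Option (Int × Int) × Option (Int × Int) :=
  (List.range rows).foldl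
    (fun st r => (List.range cols).foldl (fun st c => pvSee g st (((r : Nat) : Int), ((c : Nat) : Int))) st)
    (none, none, none)

-- the inner 'for _ in range(jump): nr += dr; …; break' walk of A's moves
def pvWalkA (g : List (List Char)) (rows cols dr dc : Int) : Nat → Int → Int → List (Int × Int)
  | 0, _, _ => []
  | fuel + 1, r, c =>
    let nr := r + dr
    let nc := c + dc
    if 0 ≤ nr ∧ nr < rows ∧ 0 ≤ nc ∧ nc < cols ∧ pvCell g nr nc ≠ '#' then
      (nr, nc) :: pvWalkA g rows cols dr dc fuel nr nc
    else []

def pvMovesA (g : List (List Char)) (rows cols : Int) (p : Int × Int) (jump : Int) :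
    List (Int × Int) :=
  p :: pvDirs.flatMap (fun d => pvWalkA g rows cols d.1 d.2 jump.toNat p.1 p.2)

-- A's dfs; fuel = max_turns - turn, so fuel = 0 is exactly 'turn >= max_turns'
def pvDfsA (g : List (List Char)) (rows cols : Int) (food : Int × Int)
    (mouseJump catJump : Int) : Nat → Nat → (Int × Int) → (Int × Int) → Bool
  | 0, _, _, _ => false
  | fuel + 1, turn, mouse, cat =>
    if mouse = cat then false
    else if mouse = food then true
    else if cat = food then false
    else if turn % 2 = 0 then
      (pvMovesA g rows cols mouse mouseJump).any
        (fun nm => pvDfsA g rows cols food mouseJump catJump fuel (turn + 1) nm cat)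
    else
      (pvMovesA g rows cols cat catJump).all
        (fun nc => pvDfsA g rows cols food mouseJump catJump fuel (turn + 1) mouse nc)

def canMouseWin (grid : List String) (catJump : Int) (mouseJump : Int) : Bool :=
  let g := grid.map String.toList
  let rows := grid.length
  let cols := (grid.headD "").toList.length  -- len(grid[0]); Pre_ excludes the empty grid
  match pvScanA g rows cols with
  | (some mouseStart, some catStart, some food) =>
      pvDfsA g (rows : Int) (cols : Int) food mouseJump catJump (rows * cols * 2) 0 mouseStart catStart
  | _ => false  -- Python raises NameError here; excluded by Pre_

-- ===== PORT B =====

-- B's 'while k <= jump: ny, nx = i//w + dy*k, i%w + dx*k; …' ray, on the flattened board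
def pvRayB (board : List Char) (h w y0 x0 dy dx : Int) : Nat → Int → List Int
  | 0, _ => []
  | fuel + 1, k =>
    let ny := y0 + dy * k
    let nx := x0 + dx * k
    if 0 ≤ ny ∧ ny < h ∧ 0 ≤ nx ∧ nx < w ∧ board.getD (ny * w + nx).toNat ' ' ≠ '#' then
      (ny * w + nx) :: pvRayB board h w y0 x0 dy dx fuel (k + 1)
    else []

-- B's reach(i, jump): all cells a piece at board index i can move to, as board indices
def pvReachB (board : List Char) (h w i jump : Int) : List Int :=
  i :: ([((1 : Int), (0 : Int)), (-1, 0), (0, 1), (0, -1)].flatMap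
    (fun d => pvRayB board h w (PySem.Int.floordiv i w) (PySem.Int.mod i w) d.1 d.2 jump.toNat 1))

-- B's val(layer, turn, s): the game value of packed state s = mse*ncells + cat at the given turn
def pvValB (ncells fpos : Int) (mmoves cmoves : List (List Int)) (layer : List Bool) (turn : Nat) (s : Int) : Bool :=
  let mse := PySem.Int.floordiv s ncells
  let cat := PySem.Int.mod s ncells
  if mse = cat then false
  else if mse = fpos then true
  else if cat = fpos then false
  else if turn % 2 = 0 then
    (PySem.List.pyGetD mmoves mse []).any (fun nmse => PySem.List.pyGetD layer (nmse * ncells + cat) false)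
  else
    (PySem.List.pyGetD cmoves cat []).all (fun nx => PySem.List.pyGetD layer (mse * ncells + nx) false)

def canMouseWin_alt (grid : List String) (catJump : Int) (mouseJump : Int) : Bool :=
  let h := grid.length
  let w := (grid.headD "").toList.length
  let ncells := h * w
  let board := (grid.map (fun s => s.toList.take w)).flatten
  let found := (List.range ncells).foldl (fun found i =>
      let ch := board.getD i ' '
      if ch = 'M' then (((i : Nat) : Int), found.2.1, found.2.2)
      else if ch = 'C' then (found.1, ((i : Nat) : Int), found.2.2)
      else if ch = 'F' then (found.1, found.2.1, ((i : Nat) : Int))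
      else found) ((-1 : Int), (-1 : Int), (-1 : Int))
  if min found.1 (min found.2.1 found.2.2) < 0 then false  -- Python raises ValueError here; excluded by Pre_
  else
  let mmoves := (List.range ncells).map (fun i => pvReachB board (h : Int) (w : Int) ((i : Nat) : Int) mouseJump)
  let cmoves := (List.range ncells).map (fun i => pvReachB board (h : Int) (w : Int) ((i : Nat) : Int) catJump)
  let table := ((List.range (2 * ncells)).reverse).foldl
      (fun layer turn => (List.range (ncells * ncells)).map
        (fun idx => pvValB (ncells : Int) found.2.2 mmoves cmoves layer turn ((idx : Nat) : Int)))
      (List.replicate (ncells * ncells) false)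
  PySem.List.pyGetD table (found.1 * (ncells : Int) + found.2.1) false

-- ===== PRECONDITION & SPEC =====

-- Pre_ excludes exactly the inputs where the Python A raises: an empty grid (IndexError on
-- grid[0]), a row shorter than len(grid[0]) (IndexError while indexing column c < cols), and
-- grids missing any of 'M'/'C'/'F' in the scanned region (the first cols characters of each
-- row), which leaves a start variable unbound (NameError).
def Pre_canMouseWin (grid : List String) (catJump : Int) (mouseJump : Int) : Prop :=
  grid ≠ [] ∧
  (∀ s ∈ grid, (grid.headD "").toList.length ≤ s.toList.length) ∧
  (∃ s ∈ grid, 'M' ∈ s.toList.take (grid.headD "").toList.length) ∧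
  (∃ s ∈ grid, 'C' ∈ s.toList.take (grid.headD "").toList.length) ∧
  (∃ s ∈ grid, 'F' ∈ s.toList.take (grid.headD "").toList.length)

instance (grid : List String) (catJump : Int) (mouseJump : Int) :
    Decidable (Pre_canMouseWin grid catJump mouseJump) := by
  unfold Pre_canMouseWin; infer_instance

def pvWitness_canMouseWin : List String × Int × Int := (["M#", "CF"], 1, 1)

def Spec_canMouseWin (grid : List String) (catJump : Int) (mouseJump : Int) (out : Bool) : Prop :=
  out = canMouseWin_alt grid catJump mouseJump
instance (grid : List String) (catJump : Int) (mouseJump : Int) (out : Bool) :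
    Decidable (Spec_canMouseWin grid catJump mouseJump out) := by
  unfold Spec_canMouseWin; infer_instance

-- ===== CLAIM (what is proved, stated in full; the proofs are below) =====
def Claim_equal_canMouseWin : Prop := ∀ (grid : List String) (catJump : Int) (mouseJump : Int), Dom_canMouseWin grid catJump mouseJump → Pre_canMouseWin grid catJump mouseJump → Spec_canMouseWin grid catJump mouseJump (canMouseWin grid catJump mouseJump)

-- ===== LEMMAS AND PROOFS =====

-- generic congruence for any/all over a list
theorem pvAnyCongr {α : Type} {l : List α} {p q : α → Bool} (h : ∀ a ∈ l, p a = q a) :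
    l.any p = l.any q := by
  induction l with
  | nil => rfl
  | cons a t ih =>
    simp only [List.any_cons, h a (by simp), ih (fun x hx => h x (by simp [hx]))]

theorem pvAllCongr {α : Type} {l : List α} {p q : α → Bool} (h : ∀ a ∈ l, p a = q a) :
    l.all p = l.all q := by
  induction l with
  | nil => rfl
  | cons a t ih =>
    simp only [List.all_cons, h a (by simp), ih (fun x hx => h x (by simp [hx]))]

-- Int-pair cell list of the board, and Nat-pair index list
def pvCellsB (rows cols : Nat) : List (Int × Int) :=
  (List.range rows).flatMap (fun r => (List.range cols).map (fun c => (((r : Nat) : Int), ((c : Nat) : Int))))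

def pvIdxPairs (rows cols : Nat) : List (Nat × Nat) :=
  (List.range rows).flatMap (fun r => (List.range cols).map (fun c => (r, c)))

theorem pvCellsB_eq_idx (rows cols : Nat) :
    pvCellsB rows cols = (pvIdxPairs rows cols).map (fun rc => ((rc.1 : Int), (rc.2 : Int))) := by
  unfold pvCellsB pvIdxPairs
  rw [List.map_flatMap]
  simp [List.map_map, Function.comp_def]

theorem pvMem_cells {rows cols : Nat} {p : Int × Int} :
    p ∈ pvCellsB rows cols ↔ 0 ≤ p.1 ∧ p.1 < (rows : Int) ∧ 0 ≤ p.2 ∧ p.2 < (cols : Int) := by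
  obtain ⟨a, b⟩ := p
  unfold pvCellsB
  constructor
  · intro h
    rcases List.mem_flatMap.1 h with ⟨r, hr, h2⟩
    rcases List.mem_map.1 h2 with ⟨c, hc, he⟩
    rw [List.mem_range] at hr hc
    cases he
    exact ⟨by omega, by omega, by omega, by omega⟩
  · rintro ⟨h1, h2, h3, h4⟩
    refine List.mem_flatMap.2 ⟨a.toNat, List.mem_range.2 (by omega), List.mem_map.2
      ⟨b.toNat, List.mem_range.2 (by omega), ?_⟩⟩
    have ha : ((a.toNat : Nat) : Int) = a := by omega
    have hb : ((b.toNat : Nat) : Int) = b := by omega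
    rw [ha, hb]

theorem pvScan_eq (g : List (List Char)) (rows cols : Nat) :
    (pvCellsB rows cols).foldl (pvSee g) (none, none, none) = pvScanA g rows cols := by
  unfold pvCellsB pvScanA
  rw [List.foldl_flatMap]
  simp only [List.foldl_map]

theorem pvWalkA_mem {g : List (List Char)} {rows cols dr dc : Int} :
    ∀ {fuel : Nat} {r c : Int} {q : Int × Int}, q ∈ pvWalkA g rows cols dr dc fuel r c →
      0 ≤ q.1 ∧ q.1 < rows ∧ 0 ≤ q.2 ∧ q.2 < cols := by
  intro fuel
  induction fuel with
  | zero => intro r c q h; simp [pvWalkA] at h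
  | succ n ih =>
    intro r c q h
    simp only [pvWalkA] at h
    split_ifs at h with hcond
    · rcases List.mem_cons.1 h with rfl | h'
      · exact ⟨hcond.1, hcond.2.1, hcond.2.2.1, hcond.2.2.2.1⟩
      · exact ih h'
    · simp at h

theorem pvMovesA_mem {g : List (List Char)} {rows cols : Nat} {p q : Int × Int} {jump : Int}
    (hp : p ∈ pvCellsB rows cols)
    (hq : q ∈ pvMovesA g (rows : Int) (cols : Int) p jump) : q ∈ pvCellsB rows cols := by
  unfold pvMovesA at hq
  rcases List.mem_cons.1 hq with rfl | hq'
  · exact hp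
  · rcases List.mem_flatMap.1 hq' with ⟨d, _, hw⟩
    exact pvMem_cells.2 (pvWalkA_mem hw)

-- ===== flat-board facts =====

theorem pvFlat_get (grid : List String) (cols : Nat)
    (hlen : ∀ s ∈ grid, cols ≤ s.toList.length) :
    ∀ (r c : Nat), r < grid.length → c < cols →
      ((grid.map (fun s => s.toList.take cols)).flatten).getD (r * cols + c) ' ' =
        pvCell (grid.map String.toList) ((r : Nat) : Int) ((c : Nat) : Int) := by
  induction grid with
  | nil => intro r c hr _; simp at hr
  | cons a t ih =>
    intro r c hr hc
    have ha := hlen a (by simp)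
    cases r with
    | zero =>
      simp only [List.map_cons, List.flatten_cons, Nat.zero_mul, Nat.zero_add]
      rw [List.getD_eq_getElem?_getD, List.getElem?_append_left (by simp only [List.length_take]; omega)]
      rw [List.getElem?_take]
      simp only [pvCell, Int.toNat_natCast]
      simp [hc, List.getD_eq_getElem?_getD]
    | succ r' =>
      simp only [List.map_cons, List.flatten_cons]
      have hidx : (r' + 1) * cols + c = (a.toList.take cols).length + (r' * cols + c) := by
        simp only [List.length_take, Nat.succ_mul]
        omega
      rw [List.getD_eq_getElem?_getD, hidx, List.getElem?_append_right (by omega)]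
      have h0 : (a.toList.take cols).length + (r' * cols + c) - (a.toList.take cols).length =
          r' * cols + c := by omega
      rw [h0, ← List.getD_eq_getElem?_getD, ih (fun s hs => hlen s (by simp [hs])) r' c (by simp only [List.length_cons] at hr; omega) hc]
      simp only [pvCell]
      have h1 : (((r' + 1 : Nat) : Int)).toNat = r' + 1 := by omega
      have h2 : (((r' : Nat) : Int)).toNat = r' := by omega
      rw [h1, h2]
      rfl

-- ===== packed-index arithmetic =====

theorem pvUnpack (a b N : Int) (hb0 : 0 ≤ b) (hbN : b < N) :
    PySem.Int.floordiv (a * N + b) N = a ∧ PySem.Int.mod (a * N + b) N = b := by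
  have hN : 0 < N := by omega
  rw [PySem.Int.floordiv_eq_ediv_of_pos hN, PySem.Int.mod_eq_emod_of_pos hN]
  constructor
  · rw [show a * N + b = b + a * N by ring, Int.add_mul_ediv_right _ _ (by omega : N ≠ 0),
      Int.ediv_eq_zero_of_lt hb0 hbN]
    ring
  · rw [show a * N + b = b + N * a by ring, Int.add_mul_emod_self_left]
    exact Int.emod_eq_of_lt hb0 hbN

theorem pvEncInj {cols : Nat} {p q : Int × Int} (hp2 : 0 ≤ p.2) (hp2' : p.2 < (cols : Int))
    (hq2 : 0 ≤ q.2) (hq2' : q.2 < (cols : Int))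
    (h : p.1 * (cols : Int) + p.2 = q.1 * (cols : Int) + q.2) : p = q := by
  have h2 : p.2 = q.2 := by
    have e1 := (pvUnpack p.1 p.2 cols hp2 hp2').2
    have e2 := (pvUnpack q.1 q.2 cols hq2 hq2').2
    rw [← e1, ← e2, h]
  have h1 : p.1 = q.1 := by
    have : p.1 * (cols : Int) = q.1 * (cols : Int) := by omega
    exact mul_right_cancel₀ (by omega : (cols : Int) ≠ 0) this
  exact Prod.ext h1 h2

theorem pvEnc_bounds {rows cols : Nat} {p : Int × Int} (hp : p ∈ pvCellsB rows cols) :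
    0 ≤ p.1 * (cols : Int) + p.2 ∧ p.1 * (cols : Int) + p.2 < ((rows * cols : Nat) : Int) := by
  obtain ⟨h1, h2, h3, h4⟩ := pvMem_cells.1 hp
  constructor
  · nlinarith
  · push_cast
    nlinarith [mul_le_mul_of_nonneg_right (show p.1 ≤ (rows : Int) - 1 by omega)
      (show (0 : Int) ≤ (cols : Int) by positivity)]

theorem pvPack_bounds {N a b : Int} (ha : 0 ≤ a) (ha' : a < N) (hb : 0 ≤ b) (hb' : b < N) :
    0 ≤ a * N + b ∧ a * N + b < N * N := by
  constructor
  · nlinarith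
  · nlinarith [mul_le_mul_of_nonneg_right (show a ≤ N - 1 by omega) (show (0 : Int) ≤ N by omega)]

-- ===== B's ray equals A's walk, encoded =====

theorem pvRay_eq (grid : List String) (cols : Nat)
    (hlen : ∀ s ∈ grid, cols ≤ s.toList.length) (dr dc : Int) :
    ∀ (fuel : Nat) (r0 c0 k : Int),
      pvRayB ((grid.map (fun s => s.toList.take cols)).flatten) (grid.length : Int) (cols : Int)
          r0 c0 dr dc fuel k
        = (pvWalkA (grid.map String.toList) (grid.length : Int) (cols : Int) dr dc fuel
            (r0 + dr * (k - 1)) (c0 + dc * (k - 1))).map (fun q => q.1 * (cols : Int) + q.2) := by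
  intro fuel
  induction fuel with
  | zero => intro r0 c0 k; rfl
  | succ n ih =>
    intro r0 c0 k
    simp only [pvRayB, pvWalkA]
    have hr : r0 + dr * (k - 1) + dr = r0 + dr * k := by ring
    have hc : c0 + dc * (k - 1) + dc = c0 + dc * k := by ring
    rw [hr, hc]
    by_cases hb : 0 ≤ r0 + dr * k ∧ r0 + dr * k < (grid.length : Int) ∧
        0 ≤ c0 + dc * k ∧ c0 + dc * k < (cols : Int)
    · have hchar : ((grid.map (fun s => s.toList.take cols)).flatten).getD
          ((r0 + dr * k) * (cols : Int) + (c0 + dc * k)).toNat ' '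
          = pvCell (grid.map String.toList) (r0 + dr * k) (c0 + dc * k) := by
        obtain ⟨h1, h2, h3, h4⟩ := hb
        have e1 : r0 + dr * k = (((r0 + dr * k).toNat : Nat) : Int) := by omega
        have e2 : c0 + dc * k = (((c0 + dc * k).toNat : Nat) : Int) := by omega
        have e3 : ((r0 + dr * k) * (cols : Int) + (c0 + dc * k)).toNat
            = (r0 + dr * k).toNat * cols + (c0 + dc * k).toNat := by
          have hm : (r0 + dr * k) * (cols : Int) = (((r0 + dr * k).toNat * cols : Nat) : Int) := by
            push_cast [Int.toNat_of_nonneg h1]; ring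
          omega
        rw [e3, pvFlat_get grid cols hlen _ _ (by omega) (by omega), ← e1, ← e2]
      rw [hchar]
      split_ifs with hcond
      · simp only [List.map_cons]
        rw [ih, show r0 + dr * (k + 1 - 1) = r0 + dr * k from by ring,
          show c0 + dc * (k + 1 - 1) = c0 + dc * k from by ring]
      · rfl
    · rw [if_neg (by tauto), if_neg (by tauto)]
      rfl

theorem pvReach_eq (grid : List String) (cols : Nat)
    (hlen : ∀ s ∈ grid, cols ≤ s.toList.length) (p : Int × Int)
    (hp : p ∈ pvCellsB grid.length cols) (jump : Int) :
    pvReachB ((grid.map (fun s => s.toList.take cols)).flatten) (grid.length : Int) (cols : Int)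
        (p.1 * (cols : Int) + p.2) jump
      = (pvMovesA (grid.map String.toList) (grid.length : Int) (cols : Int) p jump).map
          (fun q => q.1 * (cols : Int) + q.2) := by
  obtain ⟨h1, h2, h3, h4⟩ := pvMem_cells.1 hp
  have hdiv := pvUnpack p.1 p.2 cols h3 h4
  unfold pvReachB pvMovesA
  rw [hdiv.1, hdiv.2]
  simp only [List.map_cons, List.map_flatMap]
  congr 1
  refine List.flatMap_congr ?_
  intro d _
  rw [pvRay_eq grid cols hlen d.1 d.2 jump.toNat p.1 p.2 1]
  norm_num

-- ===== scan equivalence =====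

def pvEncO (cols : Nat) : Option (Int × Int) → Int
  | none => -1
  | some p => p.1 * (cols : Int) + p.2

def pvEncSt (cols : Nat) (st : Option (Int × Int) × Option (Int × Int) × Option (Int × Int)) :
    Int × Int × Int := (pvEncO cols st.1, pvEncO cols st.2.1, pvEncO cols st.2.2)

theorem pvFoldl_hom_mem {α β γ : Type} (f : α → γ) (g1 : α → β → α) (g2 : γ → β → γ)
    (l : List β) (h : ∀ st a, a ∈ l → f (g1 st a) = g2 (f st) a) :
    ∀ init, f (l.foldl g1 init) = l.foldl g2 (f init) := by
  induction l with
  | nil => intro init; rfl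
  | cons a t ih =>
    intro init
    simp only [List.foldl_cons]
    rw [ih (fun st x hx => h st x (by simp [hx])), h init a (by simp)]

theorem pvMem_idx {rows cols : Nat} {rc : Nat × Nat} :
    rc ∈ pvIdxPairs rows cols ↔ rc.1 < rows ∧ rc.2 < cols := by
  obtain ⟨a, b⟩ := rc
  unfold pvIdxPairs
  simp only [List.mem_flatMap, List.mem_map, List.mem_range, Prod.mk.injEq]
  constructor
  · rintro ⟨r, hr, c, hc, rfl, rfl⟩; exact ⟨hr, hc⟩
  · rintro ⟨h1, h2⟩; exact ⟨a, h1, b, h2, rfl, rfl⟩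

theorem pvRange_eq_idx (rows cols : Nat) :
    List.range (rows * cols) = (pvIdxPairs rows cols).map (fun rc => rc.1 * cols + rc.2) := by
  induction rows with
  | zero => simp [pvIdxPairs]
  | succ r ih =>
    rw [show (r + 1) * cols = r * cols + cols from by ring, List.range_add]
    unfold pvIdxPairs at *
    rw [List.range_succ, List.flatMap_append, List.map_append, ← ih]
    simp [List.map_map, Function.comp_def]

theorem pvFindB_eq (grid : List String) (cols : Nat)
    (hlen : ∀ s ∈ grid, cols ≤ s.toList.length) :
    (List.range (grid.length * cols)).foldl (fun st i =>
        let ch := ((grid.map (fun s => s.toList.take cols)).flatten).getD i ' '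
        if ch = 'M' then (((i : Nat) : Int), st.2.1, st.2.2)
        else if ch = 'C' then (st.1, ((i : Nat) : Int), st.2.2)
        else if ch = 'F' then (st.1, st.2.1, ((i : Nat) : Int))
        else st) ((-1 : Int), (-1 : Int), (-1 : Int))
      = pvEncSt cols (pvScanA (grid.map String.toList) grid.length cols) := by
  rw [pvRange_eq_idx, List.foldl_map, ← pvScan_eq, pvCellsB_eq_idx, List.foldl_map,
    show ((-1 : Int), (-1 : Int), (-1 : Int)) = pvEncSt cols (none, none, none) from rfl]
  refine (pvFoldl_hom_mem (pvEncSt cols) _ _ _ ?_ _).symm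
  intro st rc hrc
  obtain ⟨hr, hc⟩ := pvMem_idx.1 hrc
  simp only
  rw [pvFlat_get grid cols hlen rc.1 rc.2 hr hc]
  unfold pvSee pvEncSt pvEncO
  simp only
  split_ifs <;> simp

-- projections of one scan step
theorem pvSee_fst (g : List (List Char)) (st : Option (Int × Int) × Option (Int × Int) × Option (Int × Int))
    (p : Int × Int) : (pvSee g st p).1 = if pvCell g p.1 p.2 = 'M' then some p else st.1 := by
  simp only [pvSee]
  split_ifs <;> simp_all

theorem pvSee_snd (g : List (List Char)) (st : Option (Int × Int) × Option (Int × Int) × Option (Int × Int))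
    (p : Int × Int) : (pvSee g st p).2.1 = if pvCell g p.1 p.2 = 'C' then some p else st.2.1 := by
  simp only [pvSee]
  split_ifs <;> simp_all

theorem pvSee_thd (g : List (List Char)) (st : Option (Int × Int) × Option (Int × Int) × Option (Int × Int))
    (p : Int × Int) : (pvSee g st p).2.2 = if pvCell g p.1 p.2 = 'F' then some p else st.2.2 := by
  simp only [pvSee]
  split_ifs <;> simp_all

theorem pvFold_some_fst (g : List (List Char)) :
    ∀ (l : List (Int × Int)) st, ((∃ p ∈ l, pvCell g p.1 p.2 = 'M') ∨ st.1.isSome) →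
      ((l.foldl (pvSee g) st).1).isSome := by
  intro l
  induction l with
  | nil =>
    rintro st h
    rcases h with ⟨p, hp, _⟩ | h
    · simp at hp
    · simpa using h
  | cons a t ih =>
    rintro st h
    rw [List.foldl_cons]
    refine ih _ ?_
    rcases h with ⟨p, hp, hch⟩ | hs
    · rcases List.mem_cons.1 hp with rfl | hp'
      · right
        rw [pvSee_fst, if_pos hch]
        rfl
      · left
        exact ⟨p, hp', hch⟩
    · right
      rw [pvSee_fst]
      split_ifs with hh
      · rfl
      · exact hs

theorem pvFold_some_snd (g : List (List Char)) :
    ∀ (l : List (Int × Int)) st, ((∃ p ∈ l, pvCell g p.1 p.2 = 'C') ∨ st.2.1.isSome) →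
      ((l.foldl (pvSee g) st).2.1).isSome := by
  intro l
  induction l with
  | nil =>
    rintro st h
    rcases h with ⟨p, hp, _⟩ | h
    · simp at hp
    · simpa using h
  | cons a t ih =>
    rintro st h
    rw [List.foldl_cons]
    refine ih _ ?_
    rcases h with ⟨p, hp, hch⟩ | hs
    · rcases List.mem_cons.1 hp with rfl | hp'
      · right
        rw [pvSee_snd, if_pos hch]
        rfl
      · left
        exact ⟨p, hp', hch⟩
    · right
      rw [pvSee_snd]
      split_ifs with hh
      · rfl
      · exact hs

theorem pvFold_some_thd (g : List (List Char)) :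
    ∀ (l : List (Int × Int)) st, ((∃ p ∈ l, pvCell g p.1 p.2 = 'F') ∨ st.2.2.isSome) →
      ((l.foldl (pvSee g) st).2.2).isSome := by
  intro l
  induction l with
  | nil =>
    rintro st h
    rcases h with ⟨p, hp, _⟩ | h
    · simp at hp
    · simpa using h
  | cons a t ih =>
    rintro st h
    rw [List.foldl_cons]
    refine ih _ ?_
    rcases h with ⟨p, hp, hch⟩ | hs
    · rcases List.mem_cons.1 hp with rfl | hp'
      · right
        rw [pvSee_thd, if_pos hch]
        rfl
      · left
        exact ⟨p, hp', hch⟩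
    · right
      rw [pvSee_thd]
      split_ifs with hh
      · rfl
      · exact hs

theorem pvPre_exists (grid : List String) (cols : Nat) (ch : Char)
    (h : ∃ s ∈ grid, ch ∈ s.toList.take cols) :
    ∃ p ∈ pvCellsB grid.length cols, pvCell (grid.map String.toList) p.1 p.2 = ch := by
  obtain ⟨s, hs, hmem⟩ := h
  obtain ⟨r, hr, rfl⟩ := List.getElem_of_mem hs
  obtain ⟨c, hc, hcv⟩ := List.getElem_of_mem hmem
  have hclt : c < cols := by
    have := hc
    simp only [List.length_take] at this
    omega
  refine ⟨(((r : Nat) : Int), ((c : Nat) : Int)), pvMem_cells.2 ⟨by omega, by omega, by omega, by omega⟩, ?_⟩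
  simp only [pvCell, Int.toNat_natCast]
  have hg : (grid.map String.toList).getD r [] = grid[r].toList := by
    rw [List.getD_eq_getElem?_getD, List.getElem?_map, List.getElem?_eq_getElem hr]
    rfl
  have hlt : c < grid[r].toList.length := by
    simp only [List.length_take] at hc
    omega
  rw [hg, List.getD_eq_getElem?_getD, List.getElem?_eq_getElem hlt]
  rw [List.getElem_take] at hcv
  exact hcv

-- ===== the bottom-up layers compute A's dfs =====

-- scan results lie inside the scanned cell list
theorem pvSee_fold_mem (g : List (List Char)) (cells : List (Int × Int)) :
    ∀ (l : List (Int × Int))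
      (st : Option (Int × Int) × Option (Int × Int) × Option (Int × Int)),
      (∀ x ∈ l, x ∈ cells) →
      (∀ p, st.1 = some p → p ∈ cells) → (∀ p, st.2.1 = some p → p ∈ cells) →
      (∀ p, st.2.2 = some p → p ∈ cells) →
      (∀ p, (l.foldl (pvSee g) st).1 = some p → p ∈ cells) ∧
      (∀ p, (l.foldl (pvSee g) st).2.1 = some p → p ∈ cells) ∧
      (∀ p, (l.foldl (pvSee g) st).2.2 = some p → p ∈ cells) := by
  intro l
  induction l with
  | nil => intro st _ h1 h2 h3; exact ⟨h1, h2, h3⟩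
  | cons a t ih =>
    intro st hl h1 h2 h3
    rw [List.foldl_cons]
    have ha : a ∈ cells := hl a (by simp)
    have ht : ∀ x ∈ t, x ∈ cells := fun x hx => hl x (by simp [hx])
    refine ih (pvSee g st a) ht ?_ ?_ ?_
    · intro p hp
      rw [pvSee_fst] at hp
      split_ifs at hp
      · obtain rfl : a = p := by simpa using hp
        exact ha
      · exact h1 p hp
    · intro p hp
      rw [pvSee_snd] at hp
      split_ifs at hp
      · obtain rfl : a = p := by simpa using hp
        exact ha
      · exact h2 p hp
    · intro p hp
      rw [pvSee_thd] at hp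
      split_ifs at hp
      · obtain rfl : a = p := by simpa using hp
        exact ha
      · exact h3 p hp

def pvIterG {σ : Type} (L : σ → Nat → σ) (base : σ) : Nat → Nat → σ
  | 0, _ => base
  | d + 1, t => L (pvIterG L base d (t + 1)) t

theorem pvFold_iterG {σ : Type} (L : σ → Nat → σ) (base : σ) (max : Nat) :
    ∀ t, t ≤ max →
      ((List.range t).reverse).foldl L (pvIterG L base (max - t) t) = pvIterG L base max 0 := by
  intro t
  induction t with
  | zero => intro _; simp
  | succ n ih =>
    intro h
    rw [List.range_succ, List.reverse_append]
    simp only [List.reverse_cons, List.reverse_nil, List.nil_append, List.singleton_append,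
      List.foldl_cons]
    have h1 : max - n = (max - (n + 1)) + 1 := by omega
    have h2 : L (pvIterG L base (max - (n + 1)) (n + 1)) n = pvIterG L base (max - n) n := by
      rw [h1]; rfl
    rw [h2]
    exact ih (by omega)

theorem pvGetD_replicate_false (k : Nat) (i : Int) :
    PySem.List.pyGetD (List.replicate k false) i false = false := by
  cases h : PySem.List.pyGet? (List.replicate k false) i with
  | none => simp [PySem.List.pyGetD, h]
  | some x =>
    have hx := PySem.List.mem_of_pyGet?_eq_some _ h
    simp [PySem.List.pyGetD, h, List.eq_of_mem_replicate hx]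

theorem pvMainB (grid : List String) (cols : Nat)
    (hlen : ∀ s ∈ grid, cols ≤ s.toList.length)
    (mouseJump catJump : Int) (food : Int × Int)
    (hfood : food ∈ pvCellsB grid.length cols) :
    ∀ (d t : Nat) (mp cp : Int × Int),
      mp ∈ pvCellsB grid.length cols → cp ∈ pvCellsB grid.length cols →
      PySem.List.pyGetD
        (pvIterG (fun prev turn => (List.range (grid.length * cols * (grid.length * cols))).map
            (fun s => pvValB ((grid.length * cols : Nat) : Int) (food.1 * (cols : Int) + food.2)
              ((List.range (grid.length * cols)).map (fun i =>
                pvReachB ((grid.map (fun s => s.toList.take cols)).flatten)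
                  (grid.length : Int) (cols : Int) ((i : Nat) : Int) mouseJump))
              ((List.range (grid.length * cols)).map (fun i =>
                pvReachB ((grid.map (fun s => s.toList.take cols)).flatten)
                  (grid.length : Int) (cols : Int) ((i : Nat) : Int) catJump))
              prev turn ((s : Nat) : Int)))
          (List.replicate (grid.length * cols * (grid.length * cols)) false) d t)
        ((mp.1 * (cols : Int) + mp.2) * ((grid.length * cols : Nat) : Int)
          + (cp.1 * (cols : Int) + cp.2)) false
      = pvDfsA (grid.map String.toList) (grid.length : Int) (cols : Int) food mouseJump catJump
          d t mp cp := by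
  intro d
  induction d with
  | zero => intro t mp cp _ _; simp [pvIterG, pvDfsA, pvGetD_replicate_false]
  | succ n ih =>
    intro t mp cp hm hc
    obtain ⟨hm1, hm2, hm3, hm4⟩ := pvMem_cells.1 hm
    obtain ⟨hc1, hc2, hc3, hc4⟩ := pvMem_cells.1 hc
    obtain ⟨hf1, hf2, hf3, hf4⟩ := pvMem_cells.1 hfood
    have hem := pvEnc_bounds hm
    have hec := pvEnc_bounds hc
    have hpack := pvPack_bounds hem.1 hem.2 hec.1 hec.2
    rw [pvIterG]
    rw [PySem.List.pyGetD_eq_getElem _ false hpack.1 (by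
      simp only [List.length_map, List.length_range]
      push_cast
      exact_mod_cast hpack.2)]
    rw [List.getElem_map, List.getElem_range]
    have hcast : ((((mp.1 * (cols : Int) + mp.2) * ((grid.length * cols : Nat) : Int)
        + (cp.1 * (cols : Int) + cp.2)).toNat : Nat) : Int)
        = (mp.1 * (cols : Int) + mp.2) * ((grid.length * cols : Nat) : Int)
          + (cp.1 * (cols : Int) + cp.2) := Int.toNat_of_nonneg hpack.1
    rw [hcast]
    simp only [pvValB]
    rw [(pvUnpack _ _ _ hec.1 hec.2).1, (pvUnpack _ _ _ hec.1 hec.2).2]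
    simp only [pvDfsA]
    by_cases hmc : mp = cp
    · rw [if_pos (by rw [hmc]), if_pos hmc]
    · rw [if_neg (fun h => hmc (pvEncInj hm3 hm4 hc3 hc4 h)), if_neg hmc]
      by_cases hmf : mp = food
      · rw [if_pos (by rw [hmf]), if_pos hmf]
      · rw [if_neg (fun h => hmf (pvEncInj hm3 hm4 hf3 hf4 h)), if_neg hmf]
        by_cases hcf : cp = food
        · rw [if_pos (by rw [hcf]), if_pos hcf]
        · rw [if_neg (fun h => hcf (pvEncInj hc3 hc4 hf3 hf4 h)), if_neg hcf]
          by_cases ht2 : t % 2 = 0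
          · rw [if_pos ht2, if_pos ht2]
            have hmm : PySem.List.pyGetD ((List.range (grid.length * cols)).map (fun i =>
                pvReachB ((grid.map (fun s => s.toList.take cols)).flatten)
                  (grid.length : Int) (cols : Int) ((i : Nat) : Int) mouseJump))
                (mp.1 * (cols : Int) + mp.2) []
                = (pvMovesA (grid.map String.toList) (grid.length : Int) (cols : Int) mp
                    mouseJump).map (fun q => q.1 * (cols : Int) + q.2) := by
              rw [PySem.List.pyGetD_eq_getElem _ [] hem.1 (by
                simp only [List.length_map, List.length_range]
                exact_mod_cast hem.2)]
              rw [List.getElem_map, List.getElem_range,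
                show (((mp.1 * (cols : Int) + mp.2).toNat : Nat) : Int)
                  = mp.1 * (cols : Int) + mp.2 from Int.toNat_of_nonneg hem.1]
              exact pvReach_eq grid cols hlen mp hm mouseJump
            rw [hmm, List.any_map]
            refine pvAnyCongr ?_
            intro q hq
            simp only [Function.comp]
            exact ih (t + 1) q cp (pvMovesA_mem hm hq) hc
          · rw [if_neg ht2, if_neg ht2]
            have hcm : PySem.List.pyGetD ((List.range (grid.length * cols)).map (fun i =>
                pvReachB ((grid.map (fun s => s.toList.take cols)).flatten)
                  (grid.length : Int) (cols : Int) ((i : Nat) : Int) catJump))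
                (cp.1 * (cols : Int) + cp.2) []
                = (pvMovesA (grid.map String.toList) (grid.length : Int) (cols : Int) cp
                    catJump).map (fun q => q.1 * (cols : Int) + q.2) := by
              rw [PySem.List.pyGetD_eq_getElem _ [] hec.1 (by
                simp only [List.length_map, List.length_range]
                exact_mod_cast hec.2)]
              rw [List.getElem_map, List.getElem_range,
                show (((cp.1 * (cols : Int) + cp.2).toNat : Nat) : Int)
                  = cp.1 * (cols : Int) + cp.2 from Int.toNat_of_nonneg hec.1]
              exact pvReach_eq grid cols hlen cp hc catJump
            rw [hcm, List.all_map]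
            refine pvAllCongr ?_
            intro q hq
            simp only [Function.comp]
            exact ih (t + 1) mp q hm (pvMovesA_mem hc hq)

theorem canMouseWin_spec : Claim_equal_canMouseWin := by
  intro grid catJump mouseJump _ hpre
  obtain ⟨hne, hlen, hM, hC, hF⟩ := hpre
  unfold Spec_canMouseWin canMouseWin canMouseWin_alt
  simp only []
  rw [pvFindB_eq grid ((grid.headD "").toList.length) hlen]
  have hsM := pvFold_some_fst (grid.map String.toList)
    (pvCellsB grid.length ((grid.headD "").toList.length)) (none, none, none)
    (Or.inl (pvPre_exists grid _ 'M' hM))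
  have hsC := pvFold_some_snd (grid.map String.toList)
    (pvCellsB grid.length ((grid.headD "").toList.length)) (none, none, none)
    (Or.inl (pvPre_exists grid _ 'C' hC))
  have hsF := pvFold_some_thd (grid.map String.toList)
    (pvCellsB grid.length ((grid.headD "").toList.length)) (none, none, none)
    (Or.inl (pvPre_exists grid _ 'F' hF))
  have hmem := pvSee_fold_mem (grid.map String.toList)
    (pvCellsB grid.length ((grid.headD "").toList.length))
    (pvCellsB grid.length ((grid.headD "").toList.length)) (none, none, none)
    (fun x hx => hx) (by simp) (by simp) (by simp)
  rw [pvScan_eq] at hsM hsC hsF hmem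
  rcases hsc : pvScanA (grid.map String.toList) grid.length ((grid.headD "").toList.length)
    with ⟨mo, co, fo⟩
  rw [hsc] at hsM hsC hsF hmem
  obtain ⟨m0, rfl⟩ := Option.isSome_iff_exists.mp hsM
  obtain ⟨c0, rfl⟩ := Option.isSome_iff_exists.mp hsC
  obtain ⟨f0, rfl⟩ := Option.isSome_iff_exists.mp hsF
  have hm0 := hmem.1 m0 rfl
  have hc0 := hmem.2.1 c0 rfl
  have hf0 := hmem.2.2 f0 rfl
  simp only [pvEncSt, pvEncO]
  rw [if_neg (by
    have h1 := (pvEnc_bounds hm0).1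
    have h2 := (pvEnc_bounds hc0).1
    have h3 := (pvEnc_bounds hf0).1
    omega)]
  have hfold := pvFold_iterG
    (fun prev turn => (List.range (grid.length * (grid.headD "").toList.length *
        (grid.length * (grid.headD "").toList.length))).map
      (fun s => pvValB ((grid.length * (grid.headD "").toList.length : Nat) : Int)
        (f0.1 * ((grid.headD "").toList.length : Int) + f0.2)
        ((List.range (grid.length * (grid.headD "").toList.length)).map (fun i =>
          pvReachB ((grid.map (fun s => s.toList.take (grid.headD "").toList.length)).flatten)
            (grid.length : Int) ((grid.headD "").toList.length : Int) ((i : Nat) : Int) mouseJump))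
        ((List.range (grid.length * (grid.headD "").toList.length)).map (fun i =>
          pvReachB ((grid.map (fun s => s.toList.take (grid.headD "").toList.length)).flatten)
            (grid.length : Int) ((grid.headD "").toList.length : Int) ((i : Nat) : Int) catJump))
        prev turn ((s : Nat) : Int)))
    (List.replicate (grid.length * (grid.headD "").toList.length *
        (grid.length * (grid.headD "").toList.length)) false)
    (2 * (grid.length * (grid.headD "").toList.length))
    (2 * (grid.length * (grid.headD "").toList.length)) le_rfl
  rw [Nat.sub_self] at hfold
  rw [show pvIterG _ (List.replicate (grid.length * (grid.headD "").toList.length *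
      (grid.length * (grid.headD "").toList.length)) false) 0
      (2 * (grid.length * (grid.headD "").toList.length))
    = List.replicate (grid.length * (grid.headD "").toList.length *
      (grid.length * (grid.headD "").toList.length)) false from rfl] at hfold
  rw [hfold]
  rw [pvMainB grid ((grid.headD "").toList.length) hlen mouseJump catJump f0 hf0
    (2 * (grid.length * (grid.headD "").toList.length)) 0 m0 c0 hm0 hc0]
  rw [show grid.length * (grid.headD "").toList.length * 2
    = 2 * (grid.length * (grid.headD "").toList.length) from by ring]
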